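-- pv_equiv track=rewrite | github.com/jtr109/AdvancePython | questions/wangyi2017.py | valid_substr
-- ===== SOURCE A (Python) =====
-- import string
--
-- uppercase = string.ascii_uppercase
--
-- def valid_substr(s):
--     for u in uppercase:
--         if s.count(u) >= 4:
--             return False
--         sublist = s.split(u)
--         sublist.pop(0)
--         while len(sublist) > 1:
--             other_chars = ''.join(sublist[1:])
--             for c in sublist[0]:
--                 if c in other_chars:
--                     return False  # 'xyxy' mode exist
--             sublist.pop(0)
--     return True
-- ===== SOURCE B (Python) =====
-- import string
--
--
-- def _letter_ok(s, u):
--     # One linear scan: seg = how many u's seen so far; last[c] = last segment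
--     # (>=1, i.e. after the first u) in which c was seen.
--     seg = 0
--     last = {}
--     for c in s:
--         if c == u:
--             seg += 1
--             if seg == 4:
--                 return False
--         elif seg:
--             p = last.get(c)
--             if p is not None and p < seg:
--                 return False
--             last[c] = seg
--     return True
--
--
-- def valid_substr(s):
--     return all(_letter_ok(s, u) for u in string.ascii_uppercase)
-- ===== Notes on version B (the rewrite author's own statement) =====
-- stated objective: alternative
-- what changed: Replaces A's split-then-nested-scan (joining all later segments for every segment) per uppercase letter by a single linear scan per letter that keeps a segment counter and a dict of the last segment each char was seen in, failing on a char recurring in a strictly later segment or on a 4th occurrence of the letter.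
import Mathlib
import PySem

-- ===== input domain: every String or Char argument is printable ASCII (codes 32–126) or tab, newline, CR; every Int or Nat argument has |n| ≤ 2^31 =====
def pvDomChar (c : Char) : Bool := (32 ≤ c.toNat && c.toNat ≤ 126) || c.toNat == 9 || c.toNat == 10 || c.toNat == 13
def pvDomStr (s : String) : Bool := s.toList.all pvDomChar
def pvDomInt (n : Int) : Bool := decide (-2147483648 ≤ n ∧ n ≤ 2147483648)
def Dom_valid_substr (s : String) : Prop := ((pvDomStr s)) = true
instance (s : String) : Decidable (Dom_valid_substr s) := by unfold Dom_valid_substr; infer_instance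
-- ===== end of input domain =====

-- B replaces A's per-letter split + nested segment-vs-rest scans by one linear scan per
-- letter with a segment counter and a last-segment-seen dict (objective: alternative).

-- string.ascii_uppercase
def pvUppercase : List Char :=
  ['A','B','C','D','E','F','G','H','I','J','K','L','M',
   'N','O','P','Q','R','S','T','U','V','W','X','Y','Z']

-- ===== PORT A =====
-- while len(sublist) > 1: check chars of sublist[0] against ''.join(sublist[1:]); sublist.pop(0)
def pvWhileA : List (List Char) → Bool
  | a :: b :: rest =>
      if a.any (fun c => PySem.Chars.isIn [c] (PySem.Chars.join [] (b :: rest))) then false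
      else pvWhileA (b :: rest)
  | _ => true

-- for u in uppercase: …  (s.split(u) is always nonempty, so sublist.pop(0) is .tail)
def pvLoopA (sl : List Char) : List Char → Bool
  | [] => true
  | u :: us =>
      if 4 ≤ PySem.Chars.count sl [u] then false
      else
        if pvWhileA ((PySem.Chars.splitOn sl [u]).tail) then pvLoopA sl us
        else false

def valid_substr (s : String) : Bool := pvLoopA s.toList pvUppercase

-- ===== PORT B =====
-- _letter_ok: one scan; seg = number of u's seen, last[c] = last segment (≥1) c was seen in
def pvScanB (u : Char) : List Char → Nat → PySem.Dict Char Nat → Bool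
  | [], _, _ => true
  | c :: t, seg, last =>
      if c = u then
        if seg + 1 = 4 then false else pvScanB u t (seg + 1) last
      else if seg ≠ 0 then
        match last.get? c with
        | some p => if p < seg then false else pvScanB u t seg (last.insert c seg)
        | none => pvScanB u t seg (last.insert c seg)
      else pvScanB u t seg last

def valid_substr_alt (s : String) : Bool :=
  pvUppercase.all (fun u => pvScanB u s.toList 0 PySem.Dict.empty)

-- ===== PRECONDITION & SPEC =====
def Spec_valid_substr (s : String) (out : Bool) : Prop := out = valid_substr_alt s
instance (s : String) (out : Bool) : Decidable (Spec_valid_substr s out) := by unfold Spec_valid_substr; infer_instance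

-- ===== CLAIM (what is proved, stated in full; the proofs are below) =====
def Claim_equal_valid_substr : Prop := ∀ (s : String), Dom_valid_substr s → Spec_valid_substr s (valid_substr s)

-- ===== LEMMAS AND PROOFS =====

-- `a` and `b` share no character
def pvDisj (a b : List Char) : Prop := ∀ c, c ∈ a → c ∉ b

-- prepend to the head segment
def pvConsHead (p : List Char) : List (List Char) → List (List Char)
  | [] => [p]
  | h :: t => (p ++ h) :: t

-- reference form of s.split(u) for a single-char separator
def pvNatSplit (u : Char) : List Char → List (List Char)
  | [] => [[]]
  | c :: t => if c = u then [] :: pvNatSplit u t else pvConsHead [c] (pvNatSplit u t)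

-- scan one u-free segment at level seg: none = repeat found, some d' = updated dict
def pvScanChars (seg : Nat) : List Char → PySem.Dict Char Nat → Option (PySem.Dict Char Nat)
  | [], d => some d
  | c :: t, d =>
      (d.get? c).elim (pvScanChars seg t (d.insert c seg))
        (fun p => if p < seg then none else pvScanChars seg t (d.insert c seg))

-- B's scan, viewed segment-wise (each segment of the list is entered by reading a u)
def pvScanList : List (List Char) → Nat → PySem.Dict Char Nat → Bool
  | [], _, _ => true
  | a :: rest, seg, d =>
      if seg + 1 = 4 then false
      else (pvScanChars (seg + 1) a d).elim false (fun d' => pvScanList rest (seg + 1) d')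

-- B's scan after the u opening the head segment has been consumed
def pvProcTail : List (List Char) → Nat → PySem.Dict Char Nat → Bool
  | [], _, _ => true
  | h :: rest, seg, d =>
      (pvScanChars seg h d).elim false (fun d' => pvScanList rest seg d')

lemma pv_scanChars_cons (seg : Nat) (c : Char) (t : List Char)
    (d : PySem.Dict Char Nat) :
    pvScanChars seg (c :: t) d =
      (d.get? c).elim (pvScanChars seg t (d.insert c seg))
        (fun p => if p < seg then none else pvScanChars seg t (d.insert c seg)) := rfl

-- equation lemmas for the match in the port of B
lemma pv_scanB_cons_u (u : Char) (t : List Char) (seg : Nat) (d : PySem.Dict Char Nat) :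
    pvScanB u (u :: t) seg d = if seg + 1 = 4 then false else pvScanB u t (seg + 1) d := by
  rw [pvScanB, if_pos rfl]

lemma pv_scanB_cons_zero (u c : Char) (t : List Char) (d : PySem.Dict Char Nat)
    (hc : ¬ c = u) : pvScanB u (c :: t) 0 d = pvScanB u t 0 d := by
  rw [pvScanB, if_neg hc]
  simp

lemma pv_scanB_cons_some (u c : Char) (t : List Char) (seg p : Nat)
    (d : PySem.Dict Char Nat) (hc : ¬ c = u) (hs : seg ≠ 0) (hg : d.get? c = some p) :
    pvScanB u (c :: t) seg d =
      if p < seg then false else pvScanB u t seg (d.insert c seg) := by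
  rw [pvScanB, if_neg hc, if_pos hs, hg]

lemma pv_scanB_cons_none (u c : Char) (t : List Char) (seg : Nat)
    (d : PySem.Dict Char Nat) (hc : ¬ c = u) (hs : seg ≠ 0) (hg : d.get? c = none) :
    pvScanB u (c :: t) seg d = pvScanB u t seg (d.insert c seg) := by
  rw [pvScanB, if_neg hc, if_pos hs, hg]

lemma pv_count_go (u : Char) : ∀ (l : List Char) (fuel acc : Nat), l.length ≤ fuel →
    PySem.Chars.count.go [u] fuel l acc = acc + l.count u := by
  intro l
  induction l with
  | nil => intro fuel acc _; cases fuel <;> simp [PySem.Chars.count.go]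
  | cons c t ih =>
      intro fuel acc h
      cases fuel with
      | zero => simp at h
      | succ f =>
          simp only [PySem.Chars.count.go, List.isPrefixOf, Bool.and_true,
            List.length_singleton, List.drop_succ_cons, List.drop_zero]
          by_cases hc : u = c
          · rw [if_pos (by simp [hc])]
            rw [ih f (acc + 1) (by simpa using h)]
            simp [hc]
            omega
          · rw [if_neg (by simp [hc])]
            rw [ih f acc (by simpa using h)]
            simp [Ne.symm hc]

lemma pv_count_single (u : Char) (l : List Char) :
    PySem.Chars.count l [u] = l.count u := by
  simp [PySem.Chars.count, pv_count_go u l l.length 0 le_rfl]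

lemma pv_isIn_single (c : Char) (l : List Char) :
    PySem.Chars.isIn [c] l = l.contains c := by
  have go : ∀ (l : List Char) (k : Nat),
      (PySem.Chars.find.go [c] l k != -1) = l.contains c := by
    intro l
    induction l with
    | nil => intro k; simp [PySem.Chars.find.go]
    | cons h t ih =>
        intro k
        simp only [PySem.Chars.find.go, List.isPrefixOf, Bool.and_true]
        by_cases hc : c = h
        · simp [hc]
        · rw [if_neg (by simp [hc])]
          simp [ih (k + 1), hc]
  simp [PySem.Chars.isIn, PySem.Chars.find, go l 0]

lemma pv_consHead_consHead (p q : List Char) (l : List (List Char)) :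
    pvConsHead p (pvConsHead q l) = pvConsHead (p ++ q) l := by
  cases l <;> simp [pvConsHead]

lemma pv_consHead_ne_nil (p : List Char) (l : List (List Char)) :
    pvConsHead p l ≠ [] := by
  cases l <;> simp [pvConsHead]

lemma pv_natSplit_ne_nil (u : Char) (l : List Char) : pvNatSplit u l ≠ [] := by
  cases l with
  | nil => simp [pvNatSplit]
  | cons c t =>
      rw [pvNatSplit]
      split
      · exact List.cons_ne_nil _ _
      · exact pv_consHead_ne_nil _ _

lemma pv_consHead_nil (l : List (List Char)) (h : l ≠ []) : pvConsHead [] l = l := by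
  cases l with
  | nil => exact absurd rfl h
  | cons a t => simp [pvConsHead]

lemma pv_splitOn_go (u : Char) : ∀ (l : List Char) (fuel : Nat) (cur : List Char)
    (acc : List (List Char)), l.length ≤ fuel →
    PySem.Chars.splitOn.go [u] fuel l cur acc =
      acc.reverse ++ pvConsHead cur.reverse (pvNatSplit u l) := by
  intro l
  induction l with
  | nil =>
      intro fuel cur acc _
      cases fuel <;> simp [PySem.Chars.splitOn.go, pvNatSplit, pvConsHead]
  | cons c t ih =>
      intro fuel cur acc h
      cases fuel with
      | zero => simp at h
      | succ f =>
          simp only [PySem.Chars.splitOn.go, List.isPrefixOf, Bool.and_true,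
            List.length_singleton, List.drop_succ_cons, List.drop_zero]
          by_cases hc : u = c
          · subst hc
            rw [if_pos (by simp)]
            rw [ih f [] (cur.reverse :: acc) (by simpa using h)]
            obtain ⟨hseg, rest, hns⟩ :=
              List.exists_cons_of_ne_nil (pv_natSplit_ne_nil u t)
            rw [pvNatSplit, if_pos rfl, hns]
            simp [pvConsHead]
          · rw [if_neg (by simp [hc])]
            rw [ih f (c :: cur) acc (by simpa using h)]
            simp [pvNatSplit, Ne.symm hc, pv_consHead_consHead]

lemma pv_splitOn_single (u : Char) (l : List Char) :
    PySem.Chars.splitOn l [u] = pvNatSplit u l := by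
  rw [PySem.Chars.splitOn, pv_splitOn_go u l (l.length + 1) [] [] (by omega)]
  simp [pv_consHead_nil _ (pv_natSplit_ne_nil u l)]

lemma pv_length_natSplit (u : Char) (l : List Char) :
    (pvNatSplit u l).length = l.count u + 1 := by
  induction l with
  | nil => simp [pvNatSplit]
  | cons c t ih =>
      rw [pvNatSplit]
      by_cases hc : c = u
      · simp [hc, ih]
      · obtain ⟨a, rest, hns⟩ := List.exists_cons_of_ne_nil (pv_natSplit_ne_nil u t)
        rw [hns] at ih
        simp [hc, pvConsHead, hns]
        simpa using ih

lemma pv_join_nil (L : List (List Char)) : PySem.Chars.join [] L = L.flatten := by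
  induction L with
  | nil => simp [PySem.Chars.join, List.intercalate]
  | cons a t ih =>
      cases t with
      | nil => simp [PySem.Chars.join, List.intercalate]
      | cons b t' =>
          simp only [PySem.Chars.join, List.intercalate] at ih ⊢
          simp [List.intersperse, List.flatten] at ih ⊢
          exact ih

lemma pv_whileA_iff : ∀ (segs : List (List Char)),
    pvWhileA segs = true ↔ List.Pairwise pvDisj segs
  | [] => by simp [pvWhileA]
  | [a] => by simp [pvWhileA, pvDisj]
  | a :: b :: rest => by
      rw [pvWhileA]
      rw [List.pairwise_cons]
      constructor
      · intro h
        split_ifs at h with hany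
        refine ⟨?_, (pv_whileA_iff (b :: rest)).1 h⟩
        intro x hx c hc hcx
        apply hany
        simp only [List.any_eq_true]
        exact ⟨c, hc, by
          rw [pv_isIn_single, pv_join_nil]
          simp only [List.contains_eq_mem, decide_eq_true_eq, List.mem_flatten]
          exact ⟨x, hx, hcx⟩⟩
      · rintro ⟨hd, hp⟩
        have hany : ¬ (a.any (fun c =>
            PySem.Chars.isIn [c] (PySem.Chars.join [] (b :: rest))) = true) := by
          simp only [List.any_eq_true, not_exists]
          rintro c ⟨hc, hin⟩
          rw [pv_isIn_single, pv_join_nil] at hin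
          simp only [List.contains_eq_mem, decide_eq_true_eq, List.mem_flatten] at hin
          obtain ⟨x, hx, hcx⟩ := hin
          exact hd x hx c hc hcx
        rw [if_neg hany]
        exact (pv_whileA_iff (b :: rest)).2 hp

lemma pv_get_insert_le (seg : Nat) (d : PySem.Dict Char Nat)
    (hd : ∀ c p, d.get? c = some p → p ≤ seg) (c0 : Char) :
    ∀ c p, (d.insert c0 seg).get? c = some p → p ≤ seg := by
  intro c p h
  rw [PySem.Dict.get?_insert] at h
  split_ifs at h with he
  · simp only [Option.some.injEq] at h
    omega
  · exact hd c p h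

lemma pv_scanChars_none_iff (seg : Nat) : ∀ (a : List Char) (d : PySem.Dict Char Nat),
    (∀ c p, d.get? c = some p → p ≤ seg) →
    (pvScanChars seg a d = none ↔ ∃ c ∈ a, ∃ p, d.get? c = some p ∧ p < seg) := by
  intro a
  induction a with
  | nil => intro d _; simp [pvScanChars]
  | cons c t ih =>
      intro d hd
      have key : ∀ (hcn : ∀ p, d.get? c = some p → ¬ p < seg),
          (pvScanChars seg t (d.insert c seg) = none ↔
            ∃ c' ∈ c :: t, ∃ p, d.get? c' = some p ∧ p < seg) := by
        intro hcn
        rw [ih (d.insert c seg) (pv_get_insert_le seg d hd c)]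
        constructor
        · rintro ⟨c', hc', p, hp, hlt⟩
          rw [PySem.Dict.get?_insert] at hp
          split_ifs at hp with he
          · simp only [Option.some.injEq] at hp
            omega
          · exact ⟨c', List.mem_cons_of_mem _ hc', p, hp, hlt⟩
        · rintro ⟨c', hc', p, hp, hlt⟩
          rcases List.mem_cons.1 hc' with h1 | h1
          · exact absurd hlt (hcn p (h1 ▸ hp))
          · refine ⟨c', h1, p, ?_, hlt⟩
            rw [PySem.Dict.get?_insert, if_neg ?_]
            · exact hp
            · intro he
              exact hcn p (he ▸ hp) hlt
      rw [pvScanChars]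
      cases hg : d.get? c with
      | none =>
          rw [Option.elim_none]
          exact key (by intro p hp; rw [hg] at hp; simp at hp)
      | some p =>
          rw [Option.elim_some]
          by_cases hlt : p < seg
          · rw [if_pos hlt]
            exact ⟨fun _ => ⟨c, List.mem_cons_self, p, hg, hlt⟩, fun _ => rfl⟩
          · rw [if_neg hlt]
            exact key (by
              intro q hq
              rw [hg] at hq
              simp only [Option.some.injEq] at hq
              omega)

lemma pv_scanChars_some (seg : Nat) : ∀ (a : List Char) (d d' : PySem.Dict Char Nat),
    pvScanChars seg a d = some d' →
    ∀ c, d'.get? c = if c ∈ a then some seg else d.get? c := by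
  intro a
  induction a with
  | nil =>
      intro d d' h c
      rw [pvScanChars] at h
      cases h
      simp
  | cons c0 t ih =>
      intro d d' h c
      rw [pvScanChars] at h
      have step : ∀ (h2 : pvScanChars seg t (d.insert c0 seg) = some d'),
          d'.get? c = if c ∈ c0 :: t then some seg else d.get? c := by
        intro h2
        rw [ih _ _ h2 c]
        by_cases hct : c ∈ t
        · simp [hct]
        · by_cases hcc : c = c0
          · simp [hcc, hct]
          · simp [PySem.Dict.get?_insert, hcc, hct]
      cases hg : d.get? c0 with
      | none =>
          rw [hg, Option.elim_none] at h
          exact step h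
      | some p =>
          rw [hg, Option.elim_some] at h
          by_cases hlt : p < seg
          · rw [if_pos hlt] at h
            simp at h
          · rw [if_neg hlt] at h
            exact step h

lemma pv_scanList_iff : ∀ (segs : List (List Char)) (seg : Nat)
    (d : PySem.Dict Char Nat), seg ≤ 3 → (∀ c p, d.get? c = some p → p ≤ seg) →
    (pvScanList segs seg d = true ↔
      seg + segs.length < 4 ∧ List.Pairwise pvDisj segs ∧
        ∀ a ∈ segs, ∀ c ∈ a, d.get? c = none) := by
  intro segs
  induction segs with
  | nil =>
      intro seg d h3 _
      simp [pvScanList]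
      omega
  | cons a rest ih =>
      intro seg d h3 hd
      rw [pvScanList]
      by_cases h4 : seg + 1 = 4
      · rw [if_pos h4]
        constructor
        · intro h; cases h
        · rintro ⟨hlt, -, -⟩
          exfalso
          simp only [List.length_cons] at hlt
          omega
      · rw [if_neg h4]
        have hd' : ∀ c p, d.get? c = some p → p ≤ seg + 1 := fun c p h =>
          Nat.le_succ_of_le (hd c p h)
        cases hsc : pvScanChars (seg + 1) a d with
        | none =>
            rw [Option.elim_none]
            obtain ⟨c, hc, p, hp, -⟩ := (pv_scanChars_none_iff (seg + 1) a d hd').1 hsc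
            constructor
            · intro h; cases h
            · rintro ⟨-, -, hnone⟩
              rw [hnone a List.mem_cons_self c hc] at hp
              simp at hp
        | some d' =>
            rw [Option.elim_some]
            have hgood : ∀ c ∈ a, d.get? c = none := by
              intro c hc
              cases hg : d.get? c with
              | none => rfl
              | some p =>
                  exfalso
                  have hn : pvScanChars (seg + 1) a d = none :=
                    (pv_scanChars_none_iff (seg + 1) a d hd').2
                      ⟨c, hc, p, hg, by have := hd c p hg; omega⟩
                  rw [hn] at hsc
                  simp at hsc
            have hd'vals : ∀ c p, d'.get? c = some p → p ≤ seg + 1 := by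
              intro c p h
              rw [pv_scanChars_some (seg + 1) a d d' hsc c] at h
              split_ifs at h with hm
              · simp only [Option.some.injEq] at h
                omega
              · exact hd' c p h
            rw [ih (seg + 1) d' (by omega) hd'vals]
            constructor
            · rintro ⟨hlen, hpw, hnone⟩
              refine ⟨by simp only [List.length_cons]; omega, ?_, ?_⟩
              · rw [List.pairwise_cons]
                refine ⟨?_, hpw⟩
                intro b hb c hc hcb
                have hx := hnone b hb c hcb
                rw [pv_scanChars_some (seg + 1) a d d' hsc c] at hx
                simp [hc] at hx
              · intro b hb c hc
                rcases List.mem_cons.1 hb with h1 | h1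
                · exact hgood c (h1 ▸ hc)
                · have hx := hnone b h1 c hc
                  rw [pv_scanChars_some (seg + 1) a d d' hsc c] at hx
                  by_cases hm : c ∈ a
                  · rw [if_pos hm] at hx
                    simp at hx
                  · rw [if_neg hm] at hx
                    exact hx
            · rintro ⟨hlen, hpw, hnone⟩
              rw [List.pairwise_cons] at hpw
              refine ⟨by simp only [List.length_cons] at hlen; omega, hpw.2, ?_⟩
              intro b hb c hc
              rw [pv_scanChars_some (seg + 1) a d d' hsc c]
              have hca : c ∉ a := fun hca => hpw.1 b hb c hca hc
              rw [if_neg hca]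
              exact hnone b (List.mem_cons_of_mem _ hb) c hc

lemma pv_scanList_cons_form (ns : List (List Char)) (hns : ns ≠ [])
    (seg : Nat) (d : PySem.Dict Char Nat) :
    pvScanList ns seg d = if seg + 1 = 4 then false else pvProcTail ns (seg + 1) d := by
  cases ns with
  | nil => exact absurd rfl hns
  | cons h rest =>
      rw [pvScanList, pvProcTail]

lemma pv_scanB_eq_procTail (u : Char) : ∀ (t : List Char) (seg : Nat)
    (d : PySem.Dict Char Nat), 1 ≤ seg →
    pvScanB u t seg d = pvProcTail (pvNatSplit u t) seg d := by
  intro t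
  induction t with
  | nil =>
      intro seg d _
      rfl
  | cons c t' ih =>
      intro seg d hseg
      by_cases hc : c = u
      · subst hc
        rw [pv_scanB_cons_u, pvNatSplit, if_pos rfl]
        have hR : pvProcTail ([] :: pvNatSplit c t') seg d =
            pvScanList (pvNatSplit c t') seg d := rfl
        rw [hR, pv_scanList_cons_form (pvNatSplit c t') (pv_natSplit_ne_nil c t') seg d]
        by_cases h4 : seg + 1 = 4
        · rw [if_pos h4, if_pos h4]
        · rw [if_neg h4, if_neg h4]
          exact ih (seg + 1) d (by omega)
      · rw [pvNatSplit, if_neg hc]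
        obtain ⟨h, rest, hns⟩ := List.exists_cons_of_ne_nil (pv_natSplit_ne_nil u t')
        rw [hns, pvConsHead, List.singleton_append]
        cases hg : d.get? c with
        | none =>
            rw [pv_scanB_cons_none u c t' seg d hc (by omega) hg]
            rw [ih seg (d.insert c seg) hseg, hns]
            rw [pvProcTail, pvProcTail, pv_scanChars_cons, hg, Option.elim_none]
        | some p =>
            rw [pv_scanB_cons_some u c t' seg p d hc (by omega) hg]
            rw [pvProcTail, pv_scanChars_cons, hg, Option.elim_some]
            by_cases hlt : p < seg
            · rw [if_pos hlt, if_pos hlt, Option.elim_none]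
            · rw [if_neg hlt, if_neg hlt]
              rw [ih seg (d.insert c seg) hseg, hns, pvProcTail]

lemma pv_scanB_zero (u : Char) : ∀ (sl : List Char) (d : PySem.Dict Char Nat),
    pvScanB u sl 0 d = pvScanList (pvNatSplit u sl).tail 0 d := by
  intro sl
  induction sl with
  | nil => intro d; rfl
  | cons c t ih =>
      intro d
      by_cases hc : c = u
      · subst hc
        rw [pv_scanB_cons_u, pvNatSplit, if_pos rfl]
        simp only [List.tail_cons]
        rw [pv_scanList_cons_form (pvNatSplit c t) (pv_natSplit_ne_nil c t) 0 d]
        rw [if_neg (by omega : ¬ (0 + 1 = 4)), if_neg (by omega : ¬ (0 + 1 = 4))]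
        exact pv_scanB_eq_procTail c t 1 d le_rfl
      · rw [pv_scanB_cons_zero u c t d hc]
        rw [pvNatSplit, if_neg hc]
        obtain ⟨h, rest, hns⟩ := List.exists_cons_of_ne_nil (pv_natSplit_ne_nil u t)
        rw [hns, pvConsHead, List.singleton_append]
        simp only [List.tail_cons]
        rw [ih d, hns]
        simp

lemma pv_letter_eq (sl : List Char) (u : Char) :
    (if 4 ≤ PySem.Chars.count sl [u] then false
     else if pvWhileA ((PySem.Chars.splitOn sl [u]).tail) then true else false) =
    pvScanB u sl 0 PySem.Dict.empty := by
  rw [Bool.eq_iff_iff]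
  rw [pv_scanB_zero u sl PySem.Dict.empty]
  rw [pv_scanList_iff (pvNatSplit u sl).tail 0 PySem.Dict.empty (by omega)
    (by intro c p h; rw [PySem.Dict.get?_empty] at h; cases h)]
  rw [pv_count_single, pv_splitOn_single]
  have hlen : (pvNatSplit u sl).tail.length = sl.count u := by
    have hL := pv_length_natSplit u sl
    obtain ⟨h, rest, hns⟩ := List.exists_cons_of_ne_nil (pv_natSplit_ne_nil u sl)
    rw [hns] at hL ⊢
    simp only [List.length_cons] at hL
    simp only [List.tail_cons]
    omega
  constructor
  · intro h
    split_ifs at h with h4 hw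
    refine ⟨by rw [hlen]; omega, (pv_whileA_iff _).1 hw, ?_⟩
    intro a _ c _
    exact PySem.Dict.get?_empty c
  · rintro ⟨hlt, hpw, -⟩
    rw [hlen] at hlt
    rw [if_neg (by omega), if_pos ((pv_whileA_iff _).2 hpw)]

lemma pv_loopA_all (sl : List Char) : ∀ (us : List Char),
    pvLoopA sl us = us.all (fun u => pvScanB u sl 0 PySem.Dict.empty) := by
  intro us
  induction us with
  | nil => simp [pvLoopA]
  | cons u us' ih =>
      rw [pvLoopA, List.all_cons, ← ih, ← pv_letter_eq sl u]
      split_ifs <;> simp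

-- ===== VERDICT (by name: the statement is the Claim_ definition above) =====
theorem valid_substr_spec : Claim_equal_valid_substr := by
  intro s _
  unfold Spec_valid_substr valid_substr valid_substr_alt
  exact pv_loopA_all s.toList pvUppercase
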